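-- pv_equiv track=rewrite | github.com/Mingye-Lu/ReferenceMiner | src/refminer/utils/text.py | simple_sectionize
-- ===== SOURCE A (Python) =====
-- from typing import Iterable
--
-- def simple_sectionize(lines: Iterable[str]) -> list[tuple[str, list[str]]]:
--     sections: list[tuple[str, list[str]]] = []
--     current_title = "Body"
--     current_lines: list[str] = []
--     for line in lines:
--         if len(line) <= 80 and line.isupper():
--             if current_lines:
--                 sections.append((current_title, current_lines))
--             current_title = line.strip()
--             current_lines = []
--         else:
--             current_lines.append(line)
--     if current_lines:
--         sections.append((current_title, current_lines))
--     return sections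
-- ===== SOURCE B (Python) =====
-- def simple_sectionize(lines):
--     sections = []
--     current_title = "Body"
--     start_new = True
--     for line in lines:
--         if len(line) <= 80 and line.isupper():
--             current_title = line.strip()
--             start_new = True
--         else:
--             if start_new:
--                 sections.append((current_title, [line]))
--                 start_new = False
--             else:
--                 sections[-1][1].append(line)
--     return sections
-- ===== Notes on version B (the rewrite author's own statement) =====
-- stated objective: idiomatic
-- what changed: B drops A's current_lines buffer and its two flush sites: it materialises sections eagerly, creating a (title,[line]) entry when the first body line after a title arrives and appending later lines to the last section in place, so no final flush is needed.
import Mathlib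
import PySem

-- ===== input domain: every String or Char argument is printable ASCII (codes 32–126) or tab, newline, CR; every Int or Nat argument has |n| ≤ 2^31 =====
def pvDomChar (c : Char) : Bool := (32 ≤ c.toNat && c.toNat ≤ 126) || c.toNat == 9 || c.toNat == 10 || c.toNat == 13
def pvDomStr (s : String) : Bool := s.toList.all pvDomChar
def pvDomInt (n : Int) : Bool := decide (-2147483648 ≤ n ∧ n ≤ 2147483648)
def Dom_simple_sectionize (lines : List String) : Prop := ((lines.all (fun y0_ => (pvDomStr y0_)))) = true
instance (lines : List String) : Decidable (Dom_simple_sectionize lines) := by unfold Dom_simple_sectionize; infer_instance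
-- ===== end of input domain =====

-- B replaces A's line buffer + two flush sites by eager section construction (idiomatic decomposition, same cost).

-- s.isupper(): at least one cased character and no lowercase one; exact on the ASCII domain
-- (there the cased characters are exactly the letters). Used by both ports (both Pythons test the same condition).
def pvStrIsupper (s : String) : Bool :=
  s.toList.any PySem.Chars.isalpha && s.toList.all (fun c => !PySem.Chars.islower c)

def pvIsTitle (line : String) : Bool :=
  decide (PySem.Str.len line ≤ 80) && pvStrIsupper line

-- ===== PORT A =====
def stepA (st : List (String × List String) × String × List String) (line : String) :
    List (String × List String) × String × List String :=
  let (sections, title, cur) := st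
  if pvIsTitle line then
    ((if cur.isEmpty then sections else sections ++ [(title, cur)]), PySem.Str.strip line, [])
  else
    (sections, title, cur ++ [line])

def flushA (st : List (String × List String) × String × List String) :
    List (String × List String) :=
  let (sections, title, cur) := st
  if cur.isEmpty then sections else sections ++ [(title, cur)]

def simple_sectionize (lines : List String) : List (String × List String) :=
  flushA (lines.foldl stepA ([], "Body", []))

-- ===== PORT B =====
-- sections[-1][1].append(line): append a line to the last section in place
def pvAppendLast : List (String × List String) → String → List (String × List String)
  | [], _ => []
  | [(t, ls)], line => [(t, ls ++ [line])]
  | s :: rest, line => s :: pvAppendLast rest line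

def stepB (st : List (String × List String) × String × Bool) (line : String) :
    List (String × List String) × String × Bool :=
  let (sections, title, startNew) := st
  if pvIsTitle line then
    (sections, PySem.Str.strip line, true)
  else if startNew then
    (sections ++ [(title, [line])], title, false)
  else
    (pvAppendLast sections line, title, false)

def simple_sectionize_alt (lines : List String) : List (String × List String) :=
  (lines.foldl stepB ([], "Body", true)).1

-- ===== PRECONDITION & SPEC =====
def Spec_simple_sectionize (lines : List String) (out : List (String × List String)) : Prop := out = simple_sectionize_alt lines
instance (lines : List String) (out : List (String × List String)) : Decidable (Spec_simple_sectionize lines out) := by unfold Spec_simple_sectionize; infer_instance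

-- ===== CLAIM (what is proved, stated in full; the proofs are below) =====
def Claim_equal_simple_sectionize : Prop := ∀ (lines : List String), Dom_simple_sectionize lines → Spec_simple_sectionize lines (simple_sectionize lines)

-- ===== LEMMAS AND PROOFS =====

theorem pvAppendLast_append (xs : List (String × List String)) (t : String)
    (ls : List String) (line : String) :
    pvAppendLast (xs ++ [(t, ls)]) line = xs ++ [(t, ls ++ [line])] := by
  induction xs with
  | nil => simp [pvAppendLast]
  | cons x xs ih =>
    cases xs with
    | nil => simp [pvAppendLast]
    | cons y ys => simpa [pvAppendLast] using ih

theorem pv_invariant (lines : List String) (secs : List (String × List String))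
    (title : String) (cur : List String) :
    flushA (lines.foldl stepA (secs, title, cur)) =
      (lines.foldl stepB
        ((if cur.isEmpty then secs else secs ++ [(title, cur)]), title, cur.isEmpty)).1 := by
  induction lines generalizing secs title cur with
  | nil =>
    cases cur <;> simp [flushA]
  | cons line rest ih =>
    by_cases ht : pvIsTitle line = true
    · simp only [List.foldl_cons, stepA, stepB, ht, if_true]
      simpa using ih (if cur.isEmpty then secs else secs ++ [(title, cur)]) (PySem.Str.strip line) []
    · simp only [List.foldl_cons, stepA, stepB, ht, if_false, Bool.false_eq_true]
      cases cur with
      | nil =>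
        simpa using ih secs title [line]
      | cons c cs =>
        have h := ih secs title (c :: cs ++ [line])
        simp only [List.isEmpty_cons] at h ⊢
        simpa [pvAppendLast_append] using h

-- ===== VERDICT (by name: the statement is the Claim_ definition above) =====
theorem simple_sectionize_spec : Claim_equal_simple_sectionize := by
  intro lines _
  unfold Spec_simple_sectionize simple_sectionize simple_sectionize_alt
  simpa using pv_invariant lines [] "Body" []
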